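-- pv_equiv track=rewrite | github.com/marlmuel/codon-optimizer | app.py | optimize_sequence
-- ===== SOURCE A (Python) =====
-- GENETIC_CODE = {
--     'TTT': 'F', 'TTC': 'F', 'TTA': 'L', 'TTG': 'L',
--     'CTT': 'L', 'CTC': 'L', 'CTA': 'L', 'CTG': 'L',
--     'ATT': 'I', 'ATC': 'I', 'ATA': 'I', 'ATG': 'M',
--     'GTT': 'V', 'GTC': 'V', 'GTA': 'V', 'GTG': 'V',
--     'TCT': 'S', 'TCC': 'S', 'TCA': 'S', 'TCG': 'S',
--     'CCT': 'P', 'CCC': 'P', 'CCA': 'P', 'CCG': 'P',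
--     'ACT': 'T', 'ACC': 'T', 'ACA': 'T', 'ACG': 'T',
--     'GCT': 'A', 'GCC': 'A', 'GCA': 'A', 'GCG': 'A',
--     'TAT': 'Y', 'TAC': 'Y', 'TAA': '*', 'TAG': '*',
--     'CAT': 'H', 'CAC': 'H', 'CAA': 'Q', 'CAG': 'Q',
--     'AAT': 'N', 'AAC': 'N', 'AAA': 'K', 'AAG': 'K',
--     'GAT': 'D', 'GAC': 'D', 'GAA': 'E', 'GAG': 'E',
--     'TGT': 'C', 'TGC': 'C', 'TGA': '*', 'TGG': 'W',
--     'CGT': 'R', 'CGC': 'R', 'CGA': 'R', 'CGG': 'R',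
--     'AGT': 'S', 'AGC': 'S', 'AGA': 'R', 'AGG': 'R',
--     'GGT': 'G', 'GGC': 'G', 'GGA': 'G', 'GGG': 'G'
-- }
--
-- def optimize_sequence(protein_seq, codon_table):
--     """Optimize protein sequence for given organism."""
--     # Group codons by amino acid
--     aa_to_codons = {}
--     for codon, aa in GENETIC_CODE.items():
--         if aa not in aa_to_codons:
--             aa_to_codons[aa] = []
--         aa_to_codons[aa].append(codon)
--
--     # Build optimized DNA
--     optimized = ''
--     for aa in protein_seq:
--         codons = aa_to_codons.get(aa, [])
--         if not codons:
--             continue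
--         # Select codon with highest frequency
--         best_codon = max(codons, key=lambda c: codon_table.get(c, 0))
--         optimized += best_codon
--
--     return optimized
-- ===== SOURCE B (Python) =====
-- # Codon families per amino acid are fixed by the genetic code, so they are
-- # precomputed as a constant table (amino acids in first-appearance order of
-- # GENETIC_CODE, codons in its insertion order).
-- AA_CODONS = [
--     ('F', ['TTT', 'TTC']),
--     ('L', ['TTA', 'TTG', 'CTT', 'CTC', 'CTA', 'CTG']),
--     ('I', ['ATT', 'ATC', 'ATA']),
--     ('M', ['ATG']),
--     ('V', ['GTT', 'GTC', 'GTA', 'GTG']),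
--     ('S', ['TCT', 'TCC', 'TCA', 'TCG', 'AGT', 'AGC']),
--     ('P', ['CCT', 'CCC', 'CCA', 'CCG']),
--     ('T', ['ACT', 'ACC', 'ACA', 'ACG']),
--     ('A', ['GCT', 'GCC', 'GCA', 'GCG']),
--     ('Y', ['TAT', 'TAC']),
--     ('*', ['TAA', 'TAG', 'TGA']),
--     ('H', ['CAT', 'CAC']),
--     ('Q', ['CAA', 'CAG']),
--     ('N', ['AAT', 'AAC']),
--     ('K', ['AAA', 'AAG']),
--     ('D', ['GAT', 'GAC']),
--     ('E', ['GAA', 'GAG']),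
--     ('C', ['TGT', 'TGC']),
--     ('W', ['TGG']),
--     ('R', ['CGT', 'CGC', 'CGA', 'CGG', 'AGA', 'AGG']),
--     ('G', ['GGT', 'GGC', 'GGA', 'GGG']),
-- ]
--
--
-- def optimize_sequence(protein_seq, codon_table):
--     """Optimize protein sequence for given organism."""
--     def pick(codons):
--         # running argmax with strict '>' keeps the first maximal codon,
--         # which is exactly max()'s tie-breaking
--         best = codons[0]
--         for c in codons[1:]:
--             if codon_table.get(c, 0) > codon_table.get(best, 0):
--                 best = c
--         return best
--     best_for = {aa: pick(cs) for aa, cs in AA_CODONS}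
--     return ''.join(best_for[aa] for aa in protein_seq if aa in best_for)
-- ===== Notes on version B (the rewrite author's own statement) =====
-- stated objective: alternative
-- what changed: B replaces A's runtime grouping of GENETIC_CODE and per-residue max() scan by a constant codon-family table AA_CODONS, an explicit running-argmax pick() computed once per amino acid, and a single precomputed-table lookup per residue.
import Mathlib
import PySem

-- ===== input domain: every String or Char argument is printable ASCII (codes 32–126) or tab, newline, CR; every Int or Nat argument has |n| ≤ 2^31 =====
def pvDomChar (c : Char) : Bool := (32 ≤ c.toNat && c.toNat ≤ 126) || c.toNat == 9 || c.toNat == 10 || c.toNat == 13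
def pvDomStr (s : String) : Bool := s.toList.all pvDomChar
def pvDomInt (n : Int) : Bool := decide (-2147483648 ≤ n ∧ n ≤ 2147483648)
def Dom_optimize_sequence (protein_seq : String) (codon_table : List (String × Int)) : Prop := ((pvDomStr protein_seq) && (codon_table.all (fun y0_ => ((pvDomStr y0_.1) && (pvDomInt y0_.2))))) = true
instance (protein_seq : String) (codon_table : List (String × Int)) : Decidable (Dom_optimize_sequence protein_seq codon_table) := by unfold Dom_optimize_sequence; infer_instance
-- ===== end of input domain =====

-- B drops A's runtime grouping of GENETIC_CODE and its per-residue max() scan: it uses a constant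
-- codon-family table and an explicit running-argmax helper, then one lookup per residue (alternative decomposition, same cost).

-- ===== PORT A =====
-- GENETIC_CODE in source order; amino acids are single chars, ported as Char.
def pvGC : List (String × Char) := [
  ("TTT",'F'), ("TTC",'F'), ("TTA",'L'), ("TTG",'L'),
  ("CTT",'L'), ("CTC",'L'), ("CTA",'L'), ("CTG",'L'),
  ("ATT",'I'), ("ATC",'I'), ("ATA",'I'), ("ATG",'M'),
  ("GTT",'V'), ("GTC",'V'), ("GTA",'V'), ("GTG",'V'),
  ("TCT",'S'), ("TCC",'S'), ("TCA",'S'), ("TCG",'S'),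
  ("CCT",'P'), ("CCC",'P'), ("CCA",'P'), ("CCG",'P'),
  ("ACT",'T'), ("ACC",'T'), ("ACA",'T'), ("ACG",'T'),
  ("GCT",'A'), ("GCC",'A'), ("GCA",'A'), ("GCG",'A'),
  ("TAT",'Y'), ("TAC",'Y'), ("TAA",'*'), ("TAG",'*'),
  ("CAT",'H'), ("CAC",'H'), ("CAA",'Q'), ("CAG",'Q'),
  ("AAT",'N'), ("AAC",'N'), ("AAA",'K'), ("AAG",'K'),
  ("GAT",'D'), ("GAC",'D'), ("GAA",'E'), ("GAG",'E'),
  ("TGT",'C'), ("TGC",'C'), ("TGA",'*'), ("TGG",'W'),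
  ("CGT",'R'), ("CGC",'R'), ("CGA",'R'), ("CGG",'R'),
  ("AGT",'S'), ("AGC",'S'), ("AGA",'R'), ("AGG",'R'),
  ("GGT",'G'), ("GGC",'G'), ("GGA",'G'), ("GGG",'G')]

-- A's grouping loop: aa_to_codons[aa] = [] when missing, then append codon.
def pvGroup : PySem.Dict Char (List String) :=
  pvGC.foldl (fun d p =>
    let d1 := if d.contains p.2 then d else d.insert p.2 []
    d1.insert p.2 ((d1.getD p.2 []) ++ [p.1])) PySem.Dict.empty

def optimize_sequence (protein_seq : String) (codon_table : List (String × Int)) : String :=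
  let aa_to_codons := pvGroup
  -- optimized += best_codon, as a Char-list accumulator (String.append is kernel-opaque)
  let optimized : List Char := protein_seq.toList.foldl (fun acc aa =>
    let codons := aa_to_codons.getD aa []
    -- 'if not codons: continue' + max(codons, key=…): max? is none exactly on []
    match PySem.List.max? codons (fun c => PySem.Dict.getD (PySem.Dict.mk codon_table) c 0) with
    | none => acc
    | some best_codon => acc ++ best_codon.toList) []
  String.ofList optimized

-- ===== PORT B =====
-- Source B's constant AA_CODONS table.
def pvAAGroups : List (Char × List String) := [
  ('F', ["TTT", "TTC"]),
  ('L', ["TTA", "TTG", "CTT", "CTC", "CTA", "CTG"]),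
  ('I', ["ATT", "ATC", "ATA"]),
  ('M', ["ATG"]),
  ('V', ["GTT", "GTC", "GTA", "GTG"]),
  ('S', ["TCT", "TCC", "TCA", "TCG", "AGT", "AGC"]),
  ('P', ["CCT", "CCC", "CCA", "CCG"]),
  ('T', ["ACT", "ACC", "ACA", "ACG"]),
  ('A', ["GCT", "GCC", "GCA", "GCG"]),
  ('Y', ["TAT", "TAC"]),
  ('*', ["TAA", "TAG", "TGA"]),
  ('H', ["CAT", "CAC"]),
  ('Q', ["CAA", "CAG"]),
  ('N', ["AAT", "AAC"]),
  ('K', ["AAA", "AAG"]),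
  ('D', ["GAT", "GAC"]),
  ('E', ["GAA", "GAG"]),
  ('C', ["TGT", "TGC"]),
  ('W', ["TGG"]),
  ('R', ["CGT", "CGC", "CGA", "CGG", "AGA", "AGG"]),
  ('G', ["GGT", "GGC", "GGA", "GGG"])]

-- pick's loop: 'for c in codons[1:]: if key(c) > key(best): best = c'
def pvPickLoop (key : String → Int) (best : String) : List String → String
  | [] => best
  | c :: rest => pvPickLoop key (if key c > key best then c else best) rest

-- pick(codons) = codons[0] then the loop ([] is unreachable: every pvAAGroups group is nonempty)
def pvPick (key : String → Int) : List String → String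
  | [] => ""
  | c :: rest => pvPickLoop key c rest

def optimize_sequence_alt (protein_seq : String) (codon_table : List (String × Int)) : String :=
  let key := fun c => PySem.Dict.getD (PySem.Dict.mk codon_table) c 0
  -- best_for = {aa: pick(cs) for aa, cs in AA_CODONS}: distinct keys, so first-match lookup
  let best_for : List (Char × String) := pvAAGroups.map (fun p => (p.1, pvPick key p.2))
  -- ''.join(best_for[aa] for aa in protein_seq if aa in best_for)
  String.ofList (((protein_seq.toList.filterMap (fun aa => best_for.lookup aa)).map String.toList).flatten)

-- ===== PRECONDITION & SPEC =====
def Spec_optimize_sequence (protein_seq : String) (codon_table : List (String × Int)) (out : String) : Prop := out = optimize_sequence_alt protein_seq codon_table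
instance (protein_seq : String) (codon_table : List (String × Int)) (out : String) : Decidable (Spec_optimize_sequence protein_seq codon_table out) := by unfold Spec_optimize_sequence; infer_instance

-- ===== CLAIM (what is proved, stated in full; the proofs are below) =====
def Claim_equal_optimize_sequence : Prop := ∀ (protein_seq : String) (codon_table : List (String × Int)), Dom_optimize_sequence protein_seq codon_table → Spec_optimize_sequence protein_seq codon_table (optimize_sequence protein_seq codon_table)

-- ===== LEMMAS AND PROOFS =====

-- max? on a nonempty list is pick: first element, then the strict running-argmax loop.
theorem pv_max?_cons (key : String → Int) : ∀ (cs : List String) (b : String),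
    PySem.List.max? (b :: cs) key = some (pvPickLoop key b cs) := by
  intro cs
  induction cs with
  | nil => intro b; rfl
  | cons x t ih =>
    intro b
    have h1 : PySem.List.max? (b :: x :: t) key
        = PySem.List.max? ((if key b < key x then x else b) :: t) key := by
      simp only [PySem.List.max?, List.foldl_cons]
      congr 1
      split <;> rfl
    rw [h1, ih]
    simp only [pvPickLoop]

-- For any grouping list with nonempty groups: A's max over the dict entry
-- equals lookup in B's mapped pick-table.
theorem pv_table (key : String → Int) : ∀ (gs : List (Char × List String)),
    (∀ p ∈ gs, p.2 ≠ []) → ∀ (aa : Char),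
    PySem.List.max? ((PySem.Dict.mk gs).getD aa []) key
    = (gs.map (fun p => (p.1, pvPick key p.2))).lookup aa := by
  intro gs
  induction gs with
  | nil => intro _ aa; rfl
  | cons p t ih =>
    intro h aa
    obtain ⟨k, v⟩ := p
    have hgd : (PySem.Dict.mk ((k, v) :: t)).getD aa []
        = ((PySem.Dict.mk ((k, v) :: t)).get? aa).getD [] := rfl
    rw [hgd, PySem.Dict.get?_mk_cons, List.map_cons, List.lookup_cons]
    by_cases hk : k = aa
    · subst hk
      simp only [beq_self_eq_true, if_true]
      have hv : v ≠ [] := h (k, v) (List.mem_cons_self)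
      obtain ⟨c, cs, rfl⟩ := List.exists_cons_of_ne_nil hv
      simp [pv_max?_cons, pvPick]
    · have h1 : (k == aa) = false := by simp [hk]
      have h2 : (aa == k) = false := by simp [Ne.symm hk]
      simp only [h1, h2, Bool.false_eq_true, if_false]
      show PySem.List.max? ((PySem.Dict.mk t).getD aa []) key = _
      exact ih (fun q hq => h q (List.mem_cons_of_mem _ hq)) aa

-- A's runtime grouping of pvGC is exactly the constant table pvAAGroups.
set_option maxRecDepth 40000 in
theorem pv_group_eq : pvGroup = PySem.Dict.mk pvAAGroups := by decide

-- every constant group is nonempty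
theorem pv_groups_ne_nil : ∀ p ∈ pvAAGroups, p.2 ≠ [] := by decide

-- Per-residue step equality.
theorem pv_step (key : String → Int) (aa : Char) :
    PySem.List.max? (pvGroup.getD aa []) key
    = (pvAAGroups.map (fun p => (p.1, pvPick key p.2))).lookup aa := by
  rw [pv_group_eq]; exact pv_table key pvAAGroups pv_groups_ne_nil aa

-- A's accumulating loop over the residues equals the filterMap-join, for any lookup function.
theorem pv_main (f : Char → Option String) (cs : List Char) : ∀ (acc : List Char),
    cs.foldl (fun acc aa => match f aa with
      | none => acc
      | some b => acc ++ b.toList) acc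
    = acc ++ ((cs.filterMap f).map String.toList).flatten := by
  induction cs with
  | nil => intro acc; simp
  | cons aa t ih =>
    intro acc
    simp only [List.foldl_cons, List.filterMap_cons]
    cases h : f aa with
    | none => simp [ih]
    | some b => simp [ih]

-- ===== VERDICT (by name: the statement is the Claim_ definition above) =====
theorem optimize_sequence_spec : Claim_equal_optimize_sequence := by
  intro ps ct _
  unfold Spec_optimize_sequence optimize_sequence optimize_sequence_alt
  simp only [pv_step (fun c => PySem.Dict.getD (PySem.Dict.mk ct) c 0)]
  rw [pv_main]
  simp
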